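-- pv_equiv track=rewrite | github.com/ForrestHilton/manim-lamination-builder | manim_lamination_builder/construct_quigs.py | base_strings
-- ===== SOURCE A (Python) =====
-- def base_strings(length, radix):
--     if radix < 2:
--         raise ValueError("radix must be at least 2")
--     for i in range(radix**length):
--         n = i
--         chars = []
--         for _ in range(length):
--             chars.append(n % radix)
--             n //= radix
--         yield tuple(reversed(chars))
-- ===== SOURCE B (Python) =====
-- def base_strings(length, radix):
--     if radix < 2:
--         raise ValueError("radix must be at least 2")
--     digits = [0] * length
--     for _ in range(radix**length):
--         yield tuple(digits)
--         j = length - 1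
--         while j >= 0:
--             digits[j] += 1
--             if digits[j] == radix:
--                 digits[j] = 0
--                 j -= 1
--             else:
--                 break
-- ===== Notes on version B (the rewrite author's own statement) =====
-- stated objective: alternative
-- what changed: B replaces A's per-index re-decoding (inner mod/div loop over every index of range(radix**length)) by a single running odometer list incremented in place with carry propagation, emitting a tuple snapshot per iteration.
import Mathlib
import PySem

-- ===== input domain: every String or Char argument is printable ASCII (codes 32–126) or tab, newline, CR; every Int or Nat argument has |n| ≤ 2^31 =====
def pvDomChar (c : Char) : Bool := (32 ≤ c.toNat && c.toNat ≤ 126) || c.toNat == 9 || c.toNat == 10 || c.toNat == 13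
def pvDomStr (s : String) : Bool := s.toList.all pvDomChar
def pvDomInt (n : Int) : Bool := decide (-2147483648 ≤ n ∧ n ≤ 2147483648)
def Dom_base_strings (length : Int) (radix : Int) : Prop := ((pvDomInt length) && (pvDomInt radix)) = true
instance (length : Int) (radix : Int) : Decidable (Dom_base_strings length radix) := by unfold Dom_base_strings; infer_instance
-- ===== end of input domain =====

-- B replaces A's per-index modular decoding by a single running odometer with carry
-- propagation (alternative decomposition, same iteration count); equality of the
-- generated sequences (as lists) is proved on Pre_ (radix ≥ 2, length ≥ 0).

-- ===== PORT A =====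
-- inner loop of A: chars = []; for _ in range(length): chars.append(n % radix); n //= radix
-- (radix ** length is ported as radix ^ length.toNat — exact for 0 ≤ length, which Pre_ demands)
def baseInner (length radix : Int) (i : Int) : List Int :=
  let st := (PySem.List.pyRange 0 length 1).foldl
      (fun (st : List Int × Int) _ =>
        (st.1 ++ [PySem.Int.mod st.2 radix], PySem.Int.floordiv st.2 radix))
      ([], i)
  st.1.reverse

def base_strings (length : Int) (radix : Int) : List (List Int) :=
  if radix < 2 then []  -- Python: raise ValueError (excluded by Pre_)
  else (PySem.List.pyRange 0 (radix ^ length.toNat) 1).map (baseInner length radix)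

-- ===== PORT B =====
-- the while loop of B, walking the reversed digit list left from the end: add 1,
-- on reaching radix set to 0 and carry, stop at the first non-carry position
def odoInc (radix : Int) : List Int → List Int
  | [] => []
  | d :: rest => if d + 1 = radix then 0 :: odoInc radix rest else (d + 1) :: rest

-- the outer `for _ in range(radix**length)` loop of B: yield, then increment
def altGo (radix : Int) : Nat → List Int → List (List Int)
  | 0, _ => []
  | k + 1, digits => digits :: altGo radix k ((odoInc radix digits.reverse).reverse)

def base_strings_alt (length : Int) (radix : Int) : List (List Int) :=
  if radix < 2 then []  -- Python: raise ValueError (excluded by Pre_)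
  else altGo radix (radix ^ length.toNat).toNat (List.replicate length.toNat 0)

-- ===== PRECONDITION & SPEC =====
-- A raises ValueError when radix < 2 and TypeError when length < 0 (radix**length is a float);
-- Pre_ excludes exactly those inputs.
def Pre_base_strings (length : Int) (radix : Int) : Prop := 2 ≤ radix ∧ 0 ≤ length
instance (length : Int) (radix : Int) : Decidable (Pre_base_strings length radix) := by
  unfold Pre_base_strings; infer_instance

def pvWitness_base_strings : Int × Int := (3, 2)

def Spec_base_strings (length : Int) (radix : Int) (out : List (List Int)) : Prop :=
  out = base_strings_alt length radix
instance (length : Int) (radix : Int) (out : List (List Int)) :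
    Decidable (Spec_base_strings length radix out) := by unfold Spec_base_strings; infer_instance

-- ===== CLAIM (what is proved, stated in full; the proofs are below) =====
def Claim_equal_base_strings : Prop := ∀ (length : Int) (radix : Int),
  Dom_base_strings length radix → Pre_base_strings length radix →
  Spec_base_strings length radix (base_strings length radix)

-- ===== LEMMAS AND PROOFS =====

-- little-endian base-r digits of n, exactly L of them
def little (r : Nat) : Nat → Nat → List Int
  | 0, _ => []
  | L + 1, n => ((n % r : Nat) : Int) :: little r L (n / r)

theorem little_succ_right (r : Nat) : ∀ (L n : Nat),
    little r (L + 1) n = little r L n ++ [((n / r ^ L % r : Nat) : Int)] := by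
  intro L
  induction L with
  | zero => intro n; simp [little]
  | succ L ih =>
      intro n
      show ((n % r : Nat) : Int) :: little r (L + 1) (n / r) = _
      rw [ih (n / r)]
      simp [little, Nat.div_div_eq_div_mul, pow_succ, mul_comm (r ^ L) r]

theorem little_zero (r : Nat) : ∀ L, little r L 0 = List.replicate L 0 := by
  intro L
  induction L with
  | zero => simp [little]
  | succ L ih => simp [little, Nat.zero_mod, Nat.zero_div, ih, List.replicate_succ]

theorem foldA (r : Nat) : ∀ (L : Nat) (cs : List Int) (n : Nat),
    (List.range L).foldl
      (fun (st : List Int × Int) _ =>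
        (st.1 ++ [PySem.Int.mod st.2 (r : Int)], PySem.Int.floordiv st.2 (r : Int)))
      (cs, (n : Int))
    = (cs ++ little r L n, ((n / r ^ L : Nat) : Int)) := by
  intro L
  induction L with
  | zero => intro cs n; simp [little]
  | succ L ih =>
      intro cs n
      rw [List.range_succ, List.foldl_append, ih cs n]
      simp only [List.foldl_cons, List.foldl_nil]
      rw [little_succ_right, PySem.Int.mod_natCast, PySem.Int.floordiv_natCast,
        Nat.div_div_eq_div_mul, ← pow_succ]
      simp [List.append_assoc]

theorem odoInc_little (r : Nat) (hr : 2 ≤ r) : ∀ (L n : Nat), n < r ^ L →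
    odoInc (r : Int) (little r L n) = little r L ((n + 1) % r ^ L) := by
  intro L
  induction L with
  | zero => intro n hn; simp [little, odoInc]
  | succ L ih =>
      intro n hn
      have hrpos : 0 < r := by omega
      have hmlt : n % r < r := Nat.mod_lt _ hrpos
      by_cases hcarry : n % r = r - 1
      · -- carrying case: last digit wraps to 0
        have hsucc : n + 1 = r * (n / r + 1) := by
          have hdm := Nat.div_add_mod n r
          rw [Nat.mul_succ]
          omega
        have h1 : ((n % r : Nat) : Int) + 1 = (r : Int) := by omega
        have hq : n / r < r ^ L := by
          rw [Nat.div_lt_iff_lt_mul hrpos]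
          calc n < r ^ (L + 1) := hn
          _ = r ^ L * r := by ring
        have hmod : (n + 1) % r ^ (L + 1) % r = 0 := by
          rw [Nat.mod_mod_of_dvd _ ⟨r ^ L, by ring⟩, hsucc, Nat.mul_mod_right]
        have hdiv : (n + 1) % r ^ (L + 1) / r = (n / r + 1) % r ^ L := by
          have hp : r ^ (L + 1) = r * r ^ L := by ring
          rw [hp, Nat.mod_mul_right_div_self, hsucc, Nat.mul_div_cancel_left _ hrpos]
        show (if ((n % r : Nat) : Int) + 1 = (r : Int) then
            0 :: odoInc (r : Int) (little r L (n / r))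
          else (((n % r : Nat) : Int) + 1) :: little r L (n / r)) = _
        rw [if_pos h1, ih (n / r) hq]
        show _ = ((((n + 1) % r ^ (L + 1)) % r : Nat) : Int)
            :: little r L ((n + 1) % r ^ (L + 1) / r)
        rw [hmod, hdiv]
        norm_num
      · -- no carry: last digit just increments
        have hsuccmod : (n + 1) % r = n % r + 1 := by
          conv_lhs => rw [Nat.add_mod]
          rw [Nat.mod_eq_of_lt (show 1 < r by omega), Nat.mod_eq_of_lt (by omega)]
        have hne : n + 1 < r ^ (L + 1) := by
          rcases Nat.lt_or_ge (n + 1) (r ^ (L + 1)) with h | h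
          · exact h
          · exfalso
            have heq : (n + 1) % r = 0 := by
              have h' : n + 1 = r ^ (L + 1) := by omega
              rw [h', pow_succ', Nat.mul_mod_right]
            omega
        have hndvd : ¬ r ∣ n + 1 := by
          intro hdvd
          obtain ⟨c, hc⟩ := hdvd
          have : (n + 1) % r = 0 := by rw [hc, Nat.mul_mod_right]
          omega
        have hd : (n + 1) / r = n / r := by
          rw [Nat.succ_div, if_neg hndvd]
          omega
        have h1 : ¬ (((n % r : Nat) : Int) + 1 = (r : Int)) := by
          intro h; apply hcarry; omega
        show (if ((n % r : Nat) : Int) + 1 = (r : Int) then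
            0 :: odoInc (r : Int) (little r L (n / r))
          else (((n % r : Nat) : Int) + 1) :: little r L (n / r)) = _
        rw [if_neg h1, Nat.mod_eq_of_lt hne]
        show _ = (((n + 1) % r : Nat) : Int) :: little r L ((n + 1) / r)
        rw [hsuccmod, hd]; push_cast; ring_nf

theorem altGo_little (r : Nat) (hr : 2 ≤ r) (L : Nat) : ∀ (k n : Nat), n < r ^ L →
    altGo (r : Int) k ((little r L n).reverse)
      = (List.range k).map (fun j => (little r L ((n + j) % r ^ L)).reverse) := by
  intro k
  induction k with
  | zero => intro n hn; simp [altGo]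
  | succ k ih =>
      intro n hn
      show (little r L n).reverse
          :: altGo (r : Int) k ((odoInc (r : Int) (little r L n).reverse.reverse).reverse) = _
      rw [List.reverse_reverse, odoInc_little r hr L n hn,
        ih ((n + 1) % r ^ L) (Nat.mod_lt _ (by positivity))]
      rw [List.range_succ_eq_map]
      simp only [List.map_cons, List.map_map]
      congr 1
      · rw [Nat.add_zero, Nat.mod_eq_of_lt hn]
      · apply List.map_congr_left
        intro j _
        simp only [Function.comp]
        congr 2
        rw [Nat.mod_add_mod]
        congr 1
        omega

theorem pre_main (length radix : Int) (h2 : 2 ≤ radix) (h0 : 0 ≤ length) :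
    base_strings length radix = base_strings_alt length radix := by
  obtain ⟨r, hr⟩ : ∃ r : Nat, radix = (r : Int) := ⟨radix.toNat, (Int.toNat_of_nonneg (by omega)).symm⟩
  subst hr
  have hr2 : 2 ≤ r := by exact_mod_cast h2
  set L := length.toNat with hL
  have hnlt : ¬ ((r : Int) < 2) := by exact_mod_cast not_lt.mpr h2
  have hpow : ((r : Int) ^ L) = ((r ^ L : Nat) : Int) := by push_cast; ring
  unfold base_strings base_strings_alt
  rw [if_neg hnlt, if_neg hnlt]
  -- A side
  rw [hpow, PySem.List.pyRange_one]
  have htn : (((r ^ L : Nat) : Int) - 0).toNat = r ^ L := by omega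
  rw [htn]
  have hA : ∀ n : Nat, baseInner length (r : Int) ((0 : Int) + (n : Int))
      = (little r L n).reverse := by
    intro n
    unfold baseInner
    rw [PySem.List.pyRange_one]
    have : (length - 0).toNat = L := by omega
    rw [this, List.foldl_map]
    have := foldA r L [] n
    simp only [zero_add]
    rw [this]
    simp
  -- rewrite A's mapped function
  rw [List.map_map]
  have hmapA : (List.range (r ^ L)).map (baseInner length (r : Int) ∘ fun k : Nat => (0 : Int) + (k : Int))
      = (List.range (r ^ L)).map (fun n => (little r L n).reverse) := by
    apply List.map_congr_left
    intro n _
    exact hA n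
  rw [hmapA]
  -- B side
  have hzero : List.replicate L (0 : Int) = (little r L 0).reverse := by
    rw [little_zero r, List.reverse_replicate]
  rw [Int.toNat_natCast]
  have hrepl : List.replicate length.toNat (0 : Int) = (little r L 0).reverse := hzero
  rw [hrepl, altGo_little r hr2 L (r ^ L) 0 (by positivity)]
  apply List.map_congr_left
  intro j hj
  rw [List.mem_range] at hj
  rw [Nat.zero_add, Nat.mod_eq_of_lt hj]

-- ===== VERDICT (by name: the statement is the Claim_ definition above) =====
theorem base_strings_spec : Claim_equal_base_strings := by
  intro length radix _ hpre
  unfold Spec_base_strings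
  exact pre_main length radix hpre.1 hpre.2
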